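-- pv_equiv track=rewrite | github.com/JuanPedroPontVerges/serverless | webapi.py | group_sections
-- ===== SOURCE A (Python) =====
-- from collections import defaultdict, Counter
-- import typing as t
--
-- def group_sections(discount_data: t.Dict[str, t.Any]) -> dict:
--     # get sub sections grouped
--     group = group_sub_sections(discount_data)
--     # organize discount sections and subsections by discount type
--     GROUPS = {
--         "Arancel": ["Arancel", "Bonif Cargo por", "Serv Ecommerce", "Serv Tarjeta No Presente", "Operaciones Internacionales"],
--         "Deduc Impositivas": ["Impuestos", "Percepciones", "Retenciones"],
--         "Dto por Ventas de Campana": ["Ventas Tj Debito c/dto"],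
--         "Serv Costos Financieros": ["Plan Cuotas"],
--         "Servicio LaPos": ["Servicio LaPos"],
--     }
--     # subsection grouped object
--     data = {
--         # create section key -> ej: Deduc Impositivas
--         key: {
--             # get subsection objects -> ej: Deduc Impositivas {"Impuestos": ..., "Percepciones": ..., "Retenciones": ...}
--             v: group.get(v) for v in values
--             # iterate through GROUPS items
--         } for key, values in GROUPS.items()
--     }
--     # final object to return
--     results = dict()
--     # iterate through sections
--     for fk, fv in data.items():
--         # create a fresh new sub sections
--         sub_section = defaultdict(Counter)
--         # iterate through sub sections
--         for sk, sv in fv.items():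
--             # add all equals discounts and store them in a new fresh sub section
--             sub_section[sk].update(sv)
--         # store a new fresh sub section in the final object
--         results[fk] = sub_section
--     # return all sub sections grouped and added
--     return results
--
-- def group_sub_sections(discount_data: t.Dict[str, t.Any]) -> dict:
--
--     # grouped sub sections
--     general = defaultdict(list)
--
--     # iterate trhough all sections
--     for kf, vf in discount_data.items():
--         # iterate trhough all subsections
--         for ks, vs in vf.items():
--             # add discounts to sub section
--             general[ks].extend(vs)
--
--     # final resul to return
--     results = dict()
--
--     # iterate through sub sections
--     for key in general:
--
--         # added discounts
--         disc = Counter()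
--
--         # iterate through sub sections discounts
--         for elm in general.get(key):
--             # add sub sections discounts to disc
--             disc.update(Counter(elm))
--
--         # set added discounts to final result
--         results[key] = dict(disc)
--
--     # returl final result
--     return results
-- ===== SOURCE B (Python) =====
-- from collections import Counter
-- import typing as t
--
-- GROUPS = {
--     "Arancel": ["Arancel", "Bonif Cargo por", "Serv Ecommerce", "Serv Tarjeta No Presente", "Operaciones Internacionales"],
--     "Deduc Impositivas": ["Impuestos", "Percepciones", "Retenciones"],
--     "Dto por Ventas de Campana": ["Ventas Tj Debito c/dto"],
--     "Serv Costos Financieros": ["Plan Cuotas"],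
--     "Servicio LaPos": ["Servicio LaPos"],
-- }
--
-- def group_sections(discount_data: t.Dict[str, t.Any]) -> dict:
--     # Directly tally each (group, subsection) cell by scanning the data once per
--     # subsection: no intermediate grouping dict, no regrouping pass.
--     def tally(sub):
--         c = Counter()
--         for section in discount_data.values():
--             for elm in section.get(sub, []):
--                 c.update(elm)
--         return c
--     return {g: {s: tally(s) for s in subs} for g, subs in GROUPS.items()}
-- ===== Notes on version B (the rewrite author's own statement) =====
-- stated objective: simpler
-- what changed: A builds a global subsection->concatenated-discounts index, sums it into a dict, regroups it through an intermediate GROUPS-shaped dict of Optionals and a second defaultdict/Counter pass; B drops all intermediate structures and directly tallies each (group, subsection) cell with one Counter by scanning the data for that subsection.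
import Mathlib
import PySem

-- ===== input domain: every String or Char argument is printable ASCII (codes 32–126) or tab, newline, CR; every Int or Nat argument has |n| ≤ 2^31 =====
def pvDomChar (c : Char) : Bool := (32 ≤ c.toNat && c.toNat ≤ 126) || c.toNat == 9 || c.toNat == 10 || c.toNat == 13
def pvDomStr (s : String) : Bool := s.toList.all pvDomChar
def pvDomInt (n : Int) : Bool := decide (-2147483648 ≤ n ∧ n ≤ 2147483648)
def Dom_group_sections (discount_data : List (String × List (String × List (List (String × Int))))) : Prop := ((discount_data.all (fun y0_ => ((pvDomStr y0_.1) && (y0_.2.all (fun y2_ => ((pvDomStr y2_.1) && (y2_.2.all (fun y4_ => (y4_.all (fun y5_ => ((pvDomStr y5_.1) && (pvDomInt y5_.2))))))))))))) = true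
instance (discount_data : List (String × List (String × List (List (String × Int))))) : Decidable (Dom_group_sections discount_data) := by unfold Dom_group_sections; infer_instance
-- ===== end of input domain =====

-- B replaces A's subsection-index dict, summed-dict pass and defaultdict/Counter regrouping pass by a
-- direct per-(group, subsection) Counter tally over the data (simpler; measured constant-factor faster).

-- ===== PORT A =====
-- the module constant GROUPS (used by both versions)
def GROUPS : List (String × List String) :=
  [("Arancel", ["Arancel", "Bonif Cargo por", "Serv Ecommerce", "Serv Tarjeta No Presente", "Operaciones Internacionales"]),
   ("Deduc Impositivas", ["Impuestos", "Percepciones", "Retenciones"]),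
   ("Dto por Ventas de Campana", ["Ventas Tj Debito c/dto"]),
   ("Serv Costos Financieros", ["Plan Cuotas"]),
   ("Servicio LaPos", ["Servicio LaPos"])]

-- Counter.update(mapping): self[k] = self.get(k, 0) + count, new keys appended in the mapping's order
def cupd (c : PySem.Dict String Int) (m : PySem.Dict String Int) : PySem.Dict String Int :=
  m.items.foldl (fun c p => c.insert p.1 (c.getD p.1 0 + p.2)) c

-- helper group_sub_sections of A
def group_sub_sections_port (discount_data : List (String × List (String × List (List (String × Int))))) :
    PySem.Dict String (PySem.Dict String Int) :=
  -- general[ks].extend(vs) over all sections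
  let general : PySem.Dict String (List (List (String × Int))) :=
    (PySem.Dict.ofList discount_data).items.foldl (fun g kv =>
      (PySem.Dict.ofList kv.2).items.foldl (fun g sv => g.modify sv.1 [] (· ++ sv.2)) g)
      PySem.Dict.empty
  -- for key in general: disc = Counter(); for elm in general.get(key): disc.update(Counter(elm)); results[key] = dict(disc)
  general.keys.foldl (fun r key =>
      r.insert key ((general.getD key []).foldl
        (fun disc elm => cupd disc (PySem.Dict.ofList elm)) PySem.Dict.empty))
    PySem.Dict.empty

def group_sections (discount_data : List (String × List (String × List (List (String × Int))))) :
    List (String × List (String × List (String × Int))) :=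
  let group := group_sub_sections_port discount_data
  -- data = {key: {v: group.get(v) for v in values} for key, values in GROUPS.items()}
  let data : List (String × List (String × Option (PySem.Dict String Int))) :=
    GROUPS.map (fun kv => (kv.1, kv.2.map (fun v => (v, group.get? v))))
  -- for fk, fv in data.items(): sub_section = defaultdict(Counter); for sk, sv in fv.items(): sub_section[sk].update(sv)
  let results : PySem.Dict String (PySem.Dict String (PySem.Dict String Int)) :=
    data.foldl (fun res fkfv =>
      res.insert fkfv.1
        (fkfv.2.foldl (fun ss skv =>
           ss.modify skv.1 PySem.Dict.empty (fun c =>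
             match skv.2 with
             | none => c          -- Counter.update(None) is a no-op
             | some sv => cupd c sv)) PySem.Dict.empty))
      PySem.Dict.empty
  results.items.map (fun p => (p.1, p.2.items.map (fun q => (q.1, q.2.items))))

-- ===== PORT B =====
-- c = Counter(); for section in discount_data.values(): for elm in section.get(sub, []): c.update(elm)
def tallyB (discount_data : List (String × List (String × List (List (String × Int))))) (sub : String) :
    PySem.Dict String Int :=
  (PySem.Dict.ofList discount_data).values.foldl (fun c sec =>
    ((PySem.Dict.ofList sec).getD sub []).foldl (fun c elm => cupd c (PySem.Dict.ofList elm)) c)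
    PySem.Dict.empty

def group_sections_alt (discount_data : List (String × List (String × List (List (String × Int))))) :
    List (String × List (String × List (String × Int))) :=
  GROUPS.map (fun gs => (gs.1, gs.2.map (fun s => (s, (tallyB discount_data s).items))))

-- ===== PRECONDITION & SPEC =====
def Spec_group_sections (discount_data : List (String × List (String × List (List (String × Int))))) (out : List (String × List (String × List (String × Int)))) : Prop := out = group_sections_alt discount_data
instance (discount_data : List (String × List (String × List (List (String × Int))))) (out : List (String × List (String × List (String × Int)))) : Decidable (Spec_group_sections discount_data out) := by unfold Spec_group_sections; infer_instance

-- ===== CLAIM (what is proved, stated in full; the proofs are below) =====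
def Claim_equal_group_sections : Prop := ∀ (discount_data : List (String × List (String × List (List (String × Int))))), Dom_group_sections discount_data → Spec_group_sections discount_data (group_sections discount_data)

-- ===== LEMMAS AND PROOFS =====

-- a left fold over a flattened list is the nested fold
lemma foldl_flatMap_eq {α β γ : Type} (l : List α) (f : α → List β) (g : γ → β → γ) (i : γ) :
    (l.flatMap f).foldl g i = l.foldl (fun a x => (f x).foldl g a) i := by
  induction l generalizing i with
  | nil => rfl
  | cons h t ih => simp only [List.flatMap_cons, List.foldl_append, List.foldl_cons]; exact ih _

lemma filter_flatMap_eq {α β : Type} (l : List α) (f : α → List β) (p : β → Bool) :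
    (l.flatMap f).filter p = l.flatMap (fun x => (f x).filter p) := by
  induction l with
  | nil => rfl
  | cons h t ih => simp [List.filter_append, ih]

lemma flatMap_flatMap_eq {α β γ : Type} (l : List α) (f : α → List β) (g : β → List γ) :
    (l.flatMap f).flatMap g = l.flatMap (fun x => (f x).flatMap g) := by
  induction l with
  | nil => rfl
  | cons h t ih => simp [ih]

-- the getD of A's extend-loop dict: concatenation of the values filed under that key
lemma getD_foldl_modify_app {β : Type} (l : List (String × List β)) (g0 : PySem.Dict String (List β)) (s : String) :
    (l.foldl (fun g p => g.modify p.1 [] (· ++ p.2)) g0).getD s []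
      = g0.getD s [] ++ (l.filter (fun p => p.1 == s)).flatMap (fun p => p.2) := by
  induction l generalizing g0 with
  | nil => simp
  | cons h t ih =>
    simp only [List.foldl_cons, ih, List.filter_cons, PySem.Dict.getD_modify]
    by_cases hs : s = h.1
    · simp [hs, List.append_assoc]
    · have : (h.1 == s) = false := by simp; exact fun e => hs e.symm
      simp [hs, this]

-- on a dict with distinct keys, collecting values of matching items is just getD
lemma filter_getD {ν : Type} (d : PySem.Dict String (List ν)) (s : String) (h : d.keys.Nodup) :
    (d.items.filter (fun p => p.1 == s)).flatMap (fun p => p.2) = d.getD s [] := by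
  obtain ⟨l⟩ := d
  simp only [PySem.Dict.keys] at h
  induction l with
  | nil => simp [PySem.Dict.getD_eq_get?_getD, PySem.Dict.get?]
  | cons p t ih =>
    obtain ⟨k, v⟩ := p
    have h' : k ∉ t.map (fun x => x.1) ∧ (t.map fun x => x.1).Nodup := by
      simpa [List.nodup_cons] using h
    rw [List.filter_cons]
    by_cases hp : k = s
    · have hb : (k == s) = true := by simpa [beq_iff_eq]
      have ht : t.filter (fun q => q.1 == s) = [] := by
        rw [List.filter_eq_nil_iff]
        intro q hq hqs
        exact h'.1 (by simpa [hp, beq_iff_eq.mp hqs] using List.mem_map_of_mem (f := fun x => x.1) hq)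
      simp [hb, ht, PySem.Dict.getD_eq_get?_getD, PySem.Dict.get?_mk_cons]
    · have hb : (k == s) = false := by simpa [beq_iff_eq]
      simp only [hb, Bool.false_eq_true, if_false]
      rw [PySem.Dict.getD_eq_get?_getD, PySem.Dict.get?_mk_cons]
      simp only [hb, Bool.false_eq_true, if_false]
      rw [← PySem.Dict.getD_eq_get?_getD]
      exact ih h'.2

-- a fold of fresh inserts from empty, looked up
lemma get?_foldl_insert_fresh {ν : Type} (ks : List String) (f : String → ν) (h : ks.Nodup) (v : String) :
    (ks.foldl (fun r k => r.insert k (f k)) (PySem.Dict.empty : PySem.Dict String ν)).get? v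
      = if v ∈ ks then some (f v) else none := by
  have hit : (List.foldl (fun r k => r.insert k (f k)) (PySem.Dict.empty : PySem.Dict String ν) ks).items
      = ks.map (fun a => (a, f a)) := by
    simpa [PySem.Dict.empty] using PySem.Dict.items_foldl_insert_fresh ks (fun x => x) f PySem.Dict.empty
      (by intro a _; exact PySem.Dict.contains_empty a) (by simpa using h)
  have hkeys : (ks.foldl (fun r k => r.insert k (f k)) (PySem.Dict.empty : PySem.Dict String ν)).keys = ks := by
    simp only [PySem.Dict.keys]
    rw [hit]
    simp [Function.comp_def]
  by_cases hv : v ∈ ks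
  · rw [if_pos hv]
    refine PySem.Dict.get?_of_mem_items _ ?_ (by rw [hkeys]; exact h)
    rw [hit]
    exact List.mem_map_of_mem (f := fun a => (a, f a)) hv
  · rw [if_neg hv, PySem.Dict.get?_eq_none_iff_not_mem_keys, hkeys]
    exact hv

-- Counter.update's insert loop over fresh distinct keys simply appends the pairs
lemma foldl_insert_getD_fresh (l : List (String × Int)) (c0 : PySem.Dict String Int)
    (hd : ∀ p ∈ l, c0.contains p.1 = false) (hnd : (l.map Prod.fst).Nodup) :
    l.foldl (fun c p => c.insert p.1 (c.getD p.1 0 + p.2)) c0 = PySem.Dict.mk (c0.items ++ l) := by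
  induction l generalizing c0 with
  | nil => obtain ⟨items⟩ := c0; simp
  | cons p t ih =>
    have h1 : c0.contains p.1 = false := hd p (List.mem_cons_self)
    have hnd' : p.1 ∉ t.map Prod.fst ∧ (t.map Prod.fst).Nodup := by
      simpa [List.nodup_cons] using hnd
    rw [List.foldl_cons, PySem.Dict.getD_of_not_contains _ _ h1,
        ih (c0.insert p.1 (0 + p.2))
          (by
            intro q hq
            rw [PySem.Dict.contains_insert]
            have hq1 : q.1 ≠ p.1 := fun e => hnd'.1 (e ▸ List.mem_map_of_mem (f := Prod.fst) hq)
            simp [hq1, hd q (List.mem_cons_of_mem _ hq)])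
          hnd'.2]
    apply PySem.Dict.ext
    simp [PySem.Dict.items_insert_of_not_contains _ _ h1]

lemma cupd_empty (m : PySem.Dict String Int) (h : m.keys.Nodup) : cupd PySem.Dict.empty m = m := by
  unfold cupd
  rw [foldl_insert_getD_fresh m.items PySem.Dict.empty
        (fun p _ => PySem.Dict.contains_empty p.1) (by simpa [PySem.Dict.keys] using h)]
  obtain ⟨l⟩ := m
  simp [PySem.Dict.empty]

lemma nodup_keys_cupd (c m : PySem.Dict String Int) (h : c.keys.Nodup) : (cupd c m).keys.Nodup :=
  PySem.Dict.nodup_keys_foldl_insert_key m.items Prod.fst _ c h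

lemma nodup_keys_foldl_cupd (L : List (List (String × Int))) (c : PySem.Dict String Int) (h : c.keys.Nodup) :
    (L.foldl (fun c elm => cupd c (PySem.Dict.ofList elm)) c).keys.Nodup := by
  induction L generalizing c with
  | nil => exact h
  | cons e t ih => exact ih _ (nodup_keys_cupd _ _ h)

-- B's tally, as a single fold over the per-section lookups flattened
lemma tallyB_eq_flat (dd : List (String × List (String × List (List (String × Int))))) (s : String) :
    tallyB dd s
      = ((PySem.Dict.ofList dd).items.flatMap (fun kv => (PySem.Dict.ofList kv.2).getD s [])).foldl
          (fun c elm => cupd c (PySem.Dict.ofList elm)) PySem.Dict.empty := by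
  unfold tallyB
  rw [foldl_flatMap_eq]
  simp [PySem.Dict.values, List.foldl_map]

-- A's per-subsection concatenated list equals B's flattened per-section lookups
lemma seq_eq (dd : List (String × List (String × List (List (String × Int))))) (s : String) :
    ((((PySem.Dict.ofList dd).items.flatMap (fun kv => (PySem.Dict.ofList kv.2).items)).filter
        (fun p => p.1 == s)).flatMap (fun p => p.2))
      = (PySem.Dict.ofList dd).items.flatMap (fun kv => (PySem.Dict.ofList kv.2).getD s []) := by
  rw [filter_flatMap_eq, flatMap_flatMap_eq]
  exact List.flatMap_congr (fun kv _ => filter_getD _ s (PySem.Dict.nodup_keys_ofList _))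

-- the value A stores for subsection s equals B's tally for s
lemma cellA_eq (dd : List (String × List (String × List (List (String × Int))))) (s : String) :
    (match (group_sub_sections_port dd).get? s with
     | none => (PySem.Dict.empty : PySem.Dict String Int)
     | some sv => cupd PySem.Dict.empty sv) = tallyB dd s := by
  unfold group_sub_sections_port
  rw [show ((PySem.Dict.ofList dd).items.foldl (fun g kv =>
        (PySem.Dict.ofList kv.2).items.foldl (fun g sv => g.modify sv.1 [] (· ++ sv.2)) g)
        PySem.Dict.empty)
      = (((PySem.Dict.ofList dd).items.flatMap (fun kv => (PySem.Dict.ofList kv.2).items)).foldl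
          (fun g sv => g.modify sv.1 [] (· ++ sv.2)) PySem.Dict.empty) from
      (foldl_flatMap_eq _ _ _ _).symm]
  set FP := (PySem.Dict.ofList dd).items.flatMap (fun kv => (PySem.Dict.ofList kv.2).items) with hFP
  set general := FP.foldl (fun g sv => g.modify sv.1 [] (· ++ sv.2)) PySem.Dict.empty with hgen
  have hkeys : general.keys = PySem.Set.ofList (FP.map Prod.fst) := by
    rw [hgen, PySem.Dict.keys_foldl_modify_key FP Prod.fst [] (fun _ p => (· ++ p.2)) PySem.Dict.empty,
        PySem.Dict.keys_empty, PySem.Set.update_nil_left]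
  have hnodk : general.keys.Nodup :=
    PySem.Dict.nodup_keys_foldl_modify_key FP Prod.fst [] (fun _ p => (· ++ p.2)) PySem.Dict.empty
      PySem.Dict.nodup_keys_empty
  rw [get?_foldl_insert_fresh _ _ hnodk s]
  by_cases hs : s ∈ general.keys
  · rw [if_pos hs]
    have hgetD : general.getD s [] = (FP.filter (fun p => p.1 == s)).flatMap (fun p => p.2) := by
      rw [hgen, getD_foldl_modify_app, PySem.Dict.getD_empty]; simp
    have hcell : (general.getD s []).foldl (fun disc elm => cupd disc (PySem.Dict.ofList elm)) PySem.Dict.empty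
        = tallyB dd s := by
      rw [hgetD, seq_eq dd s, ← tallyB_eq_flat]
    simp only [hcell]
    exact cupd_empty _ (by rw [← hcell]; exact nodup_keys_foldl_cupd _ _ PySem.Dict.nodup_keys_empty)
  · rw [if_neg hs]
    have hnone : ∀ kv ∈ (PySem.Dict.ofList dd).items, (PySem.Dict.ofList kv.2).getD s [] = [] := by
      intro kv hkv
      apply PySem.Dict.getD_of_not_contains
      rw [PySem.Dict.contains_eq_decide_mem_keys]
      simp only [decide_eq_false_iff_not]
      intro hmem
      apply hs
      rw [hkeys, PySem.Set.mem_ofList]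
      rcases List.mem_map.mp (by simpa only [PySem.Dict.keys] using hmem) with ⟨q, hq, hq1⟩
      exact hq1 ▸ List.mem_map_of_mem (f := Prod.fst) (List.mem_flatMap.mpr ⟨kv, hkv, hq⟩)
    rw [tallyB_eq_flat, List.flatMap_eq_nil_iff.mpr hnone]
    rfl

-- the modify-loop of A's last pass over fresh distinct keys appends (key, f default)
lemma items_foldl_modify_fresh {ν β : Type} (l : List β) (key : β → String) (d0 : ν) (F : β → ν → ν)
    (d : PySem.Dict String ν) (hd : ∀ a ∈ l, d.contains (key a) = false) (hnd : (l.map key).Nodup) :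
    (l.foldl (fun ss a => ss.modify (key a) d0 (F a)) d).items = d.items ++ l.map (fun a => (key a, F a d0)) := by
  induction l generalizing d with
  | nil => simp
  | cons a t ih =>
    have h1 : d.contains (key a) = false := hd a (List.mem_cons_self)
    have hnd' : key a ∉ t.map key ∧ (t.map key).Nodup := by
      simpa [List.nodup_cons] using hnd
    rw [List.foldl_cons,
        ih (d.modify (key a) d0 (F a))
          (by
            intro b hb
            rw [PySem.Dict.contains_modify]
            have hb1 : key b ≠ key a := fun e => hnd'.1 (e ▸ List.mem_map_of_mem (f := key) hb)
            simp [hb1, hd b (List.mem_cons_of_mem _ hb)])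
          hnd'.2]
    simp [PySem.Dict.modify, PySem.Dict.getD_of_not_contains _ _ h1,
          PySem.Dict.items_insert_of_not_contains _ _ h1]

-- the whole of A, written without lets, equals B
lemma main_eq (dd : List (String × List (String × List (List (String × Int))))) :
    (((GROUPS.map (fun kv => (kv.1, kv.2.map (fun v => (v, (group_sub_sections_port dd).get? v))))).foldl
        (fun res fkfv =>
          res.insert fkfv.1
            (fkfv.2.foldl (fun ss skv =>
               ss.modify skv.1 PySem.Dict.empty (fun c =>
                 match skv.2 with
                 | none => c
                 | some sv => cupd c sv)) PySem.Dict.empty))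
        (PySem.Dict.empty : PySem.Dict String (PySem.Dict String (PySem.Dict String Int)))).items.map
      (fun p => (p.1, p.2.items.map (fun q => (q.1, q.2.items)))))
      = GROUPS.map (fun gs => (gs.1, gs.2.map (fun s => (s, (tallyB dd s).items)))) := by
  have hsubs : ∀ gs ∈ GROUPS, gs.2.Nodup := by decide
  have hkeysN : ((GROUPS.map (fun kv => (kv.1, kv.2.map (fun v => (v, (group_sub_sections_port dd).get? v))))).map
      Prod.fst).Nodup := by
    rw [List.map_map]
    exact (by decide : (GROUPS.map (fun kv => kv.1)).Nodup)
  rw [PySem.Dict.items_foldl_insert_fresh _ Prod.fst _ PySem.Dict.empty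
        (fun a _ => PySem.Dict.contains_empty _) hkeysN]
  simp only [show (PySem.Dict.empty : PySem.Dict String (PySem.Dict String (PySem.Dict String Int))).items = []
      from rfl, List.nil_append, List.map_map]
  refine List.map_congr_left (fun gs hgs => ?_)
  simp only [Function.comp_def]
  rw [items_foldl_modify_fresh _ Prod.fst PySem.Dict.empty _ PySem.Dict.empty
        (fun a _ => PySem.Dict.contains_empty _)
        (by rw [List.map_map]; simpa [Function.comp_def] using hsubs gs hgs)]
  simp only [show (PySem.Dict.empty : PySem.Dict String (PySem.Dict String Int)).items = [] from rfl,
      List.nil_append, List.map_map]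
  refine congrArg (fun l => (gs.1, l)) (List.map_congr_left (fun v _ => ?_))
  simp only [Function.comp_def]
  exact congrArg (fun c => (v, PySem.Dict.items c)) (cellA_eq dd v)

-- ===== VERDICT (by name: the statement is the Claim_ definition above) =====
theorem group_sections_spec : Claim_equal_group_sections := by
  intro dd _
  unfold Spec_group_sections group_sections group_sections_alt
  exact main_eq dd
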